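-- pv_equiv track=rewrite | github.com/EAFIT-AACS/assignment2-compilabros | automata_server/automata/algorithms/ALGORITHM_3_LFCO_2025_HA_MV.py | construct_leftmost_derivation
-- ===== SOURCE A (Python) =====
-- def construct_leftmost_derivation(string):
--     if not string:
--         return "S → ε"
--
--     steps = ["S"]
--     rules = []
--     for _ in range(len(string) // 2):
--         new_step = steps[-1].replace("S", "aSb", 1)
--         steps.append(new_step)
--         rules.append("S → aSb")
--
--     steps.append(string)
--     rules.append("S → ε")
--
--     derivation = ["S"]
--     for step, rule in zip(steps[1:], rules):
--         derivation.append(f"{rule}     {step}")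
--
--     return "\n".join(derivation)
-- ===== SOURCE B (Python) =====
-- def construct_leftmost_derivation(string):
--     if not string:
--         return "S → ε"
--     lines = ["S"]
--     for i in range(len(string) // 2):
--         lines.append("S → aSb     " + "a" * (i + 1) + "S" + "b" * (i + 1))
--     lines.append("S → ε     " + string)
--     return "\n".join(lines)
-- ===== Notes on version B (the rewrite author's own statement) =====
-- stated objective: simpler
-- what changed: Each derivation line is computed in closed form (a^i S b^i) and appended directly in one pass, eliminating A's separate steps/rules lists, the repeated str.replace rewriting of the previous step, and the second zip pass.
import Mathlib
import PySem

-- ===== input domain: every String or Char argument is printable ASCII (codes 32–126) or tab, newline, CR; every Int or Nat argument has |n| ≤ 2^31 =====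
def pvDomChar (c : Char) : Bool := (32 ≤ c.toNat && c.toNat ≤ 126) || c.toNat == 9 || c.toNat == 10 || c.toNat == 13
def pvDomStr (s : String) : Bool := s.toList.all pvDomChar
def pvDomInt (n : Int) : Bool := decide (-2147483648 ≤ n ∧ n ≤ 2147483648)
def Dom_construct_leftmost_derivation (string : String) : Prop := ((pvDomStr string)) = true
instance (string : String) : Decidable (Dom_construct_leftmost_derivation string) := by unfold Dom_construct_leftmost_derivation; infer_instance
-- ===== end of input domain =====

-- B builds each derivation line in closed form (a^i S b^i) in one pass, dropping A's steps/rules lists, the repeated str.replace, and the zip pass (objective: simpler).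

-- ===== PORT A =====
-- exact port of steps[-1].replace("S", "aSb", 1): the pattern "S" is a single character,
-- so Python's first-occurrence replacement is this char-by-char scan.
def pvReplaceFirstS : List Char → List Char
  | [] => []
  | c :: rest => if c = 'S' then 'a' :: 'S' :: 'b' :: rest else c :: pvReplaceFirstS rest

def construct_leftmost_derivation (string : String) : String :=
  if string.toList = [] then "S → ε"
  else
    -- for _ in range(len(string) // 2): maintain (steps, rules)
    let sr := (List.range (string.toList.length / 2)).foldl
      (fun (sr : List String × List String) _ =>
        let newStep := String.ofList (pvReplaceFirstS ((PySem.List.pyGet? sr.1 (-1)).getD "").toList)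
        (sr.1 ++ [newStep], sr.2 ++ ["S → aSb"]))
      (["S"], [])
    let steps := sr.1 ++ [string]
    let rules := sr.2 ++ ["S → ε"]
    let derivation := (List.zip (PySem.List.slice steps (some 1) none) rules).foldl
      (fun acc p => acc ++ [p.2 ++ "     " ++ p.1]) ["S"]
    PySem.Str.join "\n" derivation

-- ===== PORT B =====
def construct_leftmost_derivation_alt (string : String) : String :=
  if string.toList = [] then "S → ε"
  else
    let lines := (List.range (string.toList.length / 2)).foldl
      (fun acc i =>
        acc ++ ["S → aSb     " ++ String.ofList (List.replicate (i + 1) 'a') ++ "S"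
                  ++ String.ofList (List.replicate (i + 1) 'b')])
      ["S"]
    PySem.Str.join "\n" (lines ++ ["S → ε     " ++ string])

-- ===== PRECONDITION & SPEC =====
def Spec_construct_leftmost_derivation (string : String) (out : String) : Prop := out = construct_leftmost_derivation_alt string
instance (string : String) (out : String) : Decidable (Spec_construct_leftmost_derivation string out) := by unfold Spec_construct_leftmost_derivation; infer_instance

-- ===== CLAIM (what is proved, stated in full; the proofs are below) =====
def Claim_equal_construct_leftmost_derivation : Prop := ∀ (string : String), Dom_construct_leftmost_derivation string → Spec_construct_leftmost_derivation string (construct_leftmost_derivation string)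

-- ===== LEMMAS AND PROOFS =====

-- the i-th sentential form a^i S b^i
def pvAstr (j : Nat) : String := String.ofList (List.replicate j 'a' ++ 'S' :: List.replicate j 'b')

theorem pvRepF (j : Nat) (t : List Char) :
    pvReplaceFirstS (List.replicate j 'a' ++ 'S' :: t) = List.replicate j 'a' ++ 'a' :: 'S' :: 'b' :: t := by
  induction j with
  | zero => simp [pvReplaceFirstS]
  | succ k ih => simp [List.replicate_succ, pvReplaceFirstS, ih]

theorem pvAstr_step (n : Nat) :
    String.ofList (pvReplaceFirstS (pvAstr n).toList) = pvAstr (n + 1) := by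
  apply String.toList_inj.mp
  simp [pvAstr, pvRepF]
  rw [← List.singleton_append, ← List.append_assoc, ← List.replicate_succ', List.replicate_succ]
  simp [List.replicate_succ]

theorem pvLast (n : Nat) :
    PySem.List.pyGet? ("S" :: (List.range n).map (fun i => pvAstr (i + 1))) (-1) = some (pvAstr n) := by
  cases n with
  | zero => decide
  | succ k =>
    rw [List.range_succ, List.map_append, List.map_singleton, ← List.cons_append]
    exact PySem.List.pyGet?_neg_one_append_singleton _ _

theorem pvLoopA (n : Nat) :
    (List.range n).foldl
      (fun (sr : List String × List String) _ =>
        let newStep := String.ofList (pvReplaceFirstS ((PySem.List.pyGet? sr.1 (-1)).getD "").toList)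
        (sr.1 ++ [newStep], sr.2 ++ ["S → aSb"]))
      (["S"], [])
    = ("S" :: (List.range n).map (fun i => pvAstr (i + 1)), List.replicate n "S → aSb") := by
  induction n with
  | zero => decide
  | succ k ih =>
    rw [List.range_succ, List.foldl_append, ih]
    simp only [List.foldl_cons, List.foldl_nil, pvLast, Option.getD_some, pvAstr_step]
    simp [List.replicate_succ']

theorem pvZipRep {α β : Type} (r : β) : ∀ (l : List α) (f : α → β),
    List.zip (l.map f) (List.replicate l.length r) = l.map (fun i => (f i, r)) := by
  intro l
  induction l with
  | nil => intro f; simp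
  | cons x xs ih => intro f; simp [List.replicate_succ, ih]

theorem pvZipRange (n : Nat) (f : Nat → String) (r : String) :
    List.zip ((List.range n).map f) (List.replicate n r) = (List.range n).map (fun i => (f i, r)) := by
  have h := pvZipRep r (List.range n) f
  simpa using h

theorem pvLine (i : Nat) :
    "S → aSb" ++ "     " ++ pvAstr (i + 1)
      = "S → aSb     " ++ String.ofList (List.replicate (i + 1) 'a') ++ "S"
          ++ String.ofList (List.replicate (i + 1) 'b') := by
  apply String.toList_inj.mp
  simp [pvAstr]

theorem pvLastLine (s : String) : "S → ε" ++ "     " ++ s = "S → ε     " ++ s := by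
  apply String.toList_inj.mp
  simp

-- ===== VERDICT (by name: the statement is the Claim_ definition above) =====
theorem construct_leftmost_derivation_spec : Claim_equal_construct_leftmost_derivation := by
  intro s _
  unfold Spec_construct_leftmost_derivation construct_leftmost_derivation construct_leftmost_derivation_alt
  by_cases h : s.toList = []
  · simp [h]
  · simp only [h, if_false]
    rw [pvLoopA]
    have hslice : PySem.List.slice (("S" :: (List.range (s.toList.length / 2)).map (fun i => pvAstr (i + 1))) ++ [s]) (some 1) none
        = (List.range (s.toList.length / 2)).map (fun i => pvAstr (i + 1)) ++ [s] := by
      rw [PySem.List.slice_from _ (by norm_num)]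
      simp
    rw [hslice]
    rw [List.zip_append (by simp)]
    rw [pvZipRange]
    rw [PySem.List.foldl_append_singleton_eq_map, PySem.List.foldl_append_singleton_eq_map]
    congr 1
    simp only [List.map_append, List.map_map, List.map_singleton, List.zip_cons_cons,
      List.zip_nil_right]
    have hmap : List.map ((fun p : String × String => p.2 ++ "     " ++ p.1) ∘ fun i => (pvAstr (i + 1), "S → aSb"))
        (List.range (s.toList.length / 2))
      = List.map (fun i => "S → aSb     " ++ String.ofList (List.replicate (i + 1) 'a') ++ "S"
          ++ String.ofList (List.replicate (i + 1) 'b')) (List.range (s.toList.length / 2)) :=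
      List.map_congr_left (fun i _ => pvLine i)
    rw [hmap, pvLastLine]
    simp
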